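-- pv_equiv track=rewrite | github.com/JasonVann/CrackingCodingInterview | CCI/C5_BitManipulation/Ex5.1.py | insert_bits2
-- ===== SOURCE A (Python) =====
-- def insert_bits2(N, M, i, j):
--     # N, M: int
--     # Replace N[j, i] with M
--     count = j - i
--     for k in range(count, -1, -1):
--         shift = j - (count-k)
--         m = M >> k
--         mask = ~(1<<shift)
--         N = N & mask
--         a = bin(N)
--         N = N | (m<<shift)
--         b = bin(N)
--     return N
-- ===== SOURCE B (Python) =====
-- def insert_bits2(N, M, i, j):
--     # Clear bits i..j of N with one mask, then OR in M shifted into place.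
--     if j < i:
--         return N
--     mask = ((1 << (j - i + 1)) - 1) << i
--     return (N & ~mask) | (M << i)
-- ===== Notes on version B (the rewrite author's own statement) =====
-- stated objective: simpler
-- what changed: A clears and re-ORs one bit position per loop iteration over k = j-i .. 0; B computes the whole answer with a single (j-i+1)-bit mask and one shift-OR, no loop.
import Mathlib
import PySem

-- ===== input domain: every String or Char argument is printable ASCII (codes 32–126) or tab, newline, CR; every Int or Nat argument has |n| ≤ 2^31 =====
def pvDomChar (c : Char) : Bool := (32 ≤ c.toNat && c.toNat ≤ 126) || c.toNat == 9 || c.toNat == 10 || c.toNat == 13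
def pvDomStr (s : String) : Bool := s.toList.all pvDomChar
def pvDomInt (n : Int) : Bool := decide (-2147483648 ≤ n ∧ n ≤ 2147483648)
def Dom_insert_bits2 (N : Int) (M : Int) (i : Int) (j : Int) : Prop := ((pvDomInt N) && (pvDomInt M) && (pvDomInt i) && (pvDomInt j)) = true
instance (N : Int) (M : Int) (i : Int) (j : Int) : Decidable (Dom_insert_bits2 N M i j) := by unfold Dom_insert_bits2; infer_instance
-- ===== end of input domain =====

-- B replaces A's per-bit clear-and-OR loop (one iteration per bit position j..i) by a single
-- mask clear plus one shifted OR, with no loop.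

-- ===== PORT A =====
-- Literal port of A: count = j - i; for k in range(count, -1, -1): shift = j-(count-k);
-- N &= ~(1<<shift); N |= (M>>k)<<shift.  Python raises ValueError on a negative shift
-- amount; Pre_ excludes exactly those inputs, so .toNat is exact on Pre_.
def insert_bits2 (N : Int) (M : Int) (i : Int) (j : Int) : Int :=
  let count := j - i
  (PySem.List.pyRange count (-1) (-1)).foldl (fun N k =>
    let shift := j - (count - k)
    let m := M >>> k.toNat
    let mask := Int.not ((1:Int) <<< shift.toNat)
    let N := PySem.Int.band N mask
    let _a := PySem.Int.pyBin N
    let N := PySem.Int.bor N (m <<< shift.toNat)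
    let _b := PySem.Int.pyBin N
    N) N

-- ===== PORT B =====
def insert_bits2_alt (N : Int) (M : Int) (i : Int) (j : Int) : Int :=
  if j < i then N
  else
    let mask := (((1:Int) <<< (j - i + 1).toNat) - 1) <<< i.toNat
    PySem.Int.bor (PySem.Int.band N (Int.not mask)) (M <<< i.toNat)

-- ===== PRECONDITION & SPEC =====
-- Pre_ excludes exactly the inputs on which the Python A raises ValueError (a negative shift
-- amount, which happens iff the loop is non-empty, i.e. i ≤ j, and i < 0; B raises there too).
def Pre_insert_bits2 (N : Int) (M : Int) (i : Int) (j : Int) : Prop := j < i ∨ 0 ≤ i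
instance (N : Int) (M : Int) (i : Int) (j : Int) : Decidable (Pre_insert_bits2 N M i j) := by unfold Pre_insert_bits2; infer_instance

def pvWitness_insert_bits2 : Int × Int × Int × Int := (1024, 19, 2, 6)

def Spec_insert_bits2 (N : Int) (M : Int) (i : Int) (j : Int) (out : Int) : Prop := out = insert_bits2_alt N M i j
instance (N : Int) (M : Int) (i : Int) (j : Int) (out : Int) : Decidable (Spec_insert_bits2 N M i j out) := by unfold Spec_insert_bits2; infer_instance

-- ===== CLAIM (what is proved, stated in full; the proofs are below) =====
def Claim_equal_insert_bits2 : Prop := ∀ (N : Int) (M : Int) (i : Int) (j : Int), Dom_insert_bits2 N M i j → Pre_insert_bits2 N M i j → Spec_insert_bits2 N M i j (insert_bits2 N M i j)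

-- ===== LEMMAS AND PROOFS =====

-- m - (m &&& n) removes from m exactly the bits it shares with n
theorem sub_and (m n : Nat) : m - (m &&& n) = m.ldiff n := by
  induction m using Nat.binaryRec generalizing n with
  | zero => exact (Nat.eq_of_testBit_eq fun k => by simp [Nat.testBit_ldiff]).symm
  | bit a m ih =>
    obtain ⟨b, n', rfl⟩ : ∃ b n', n = Nat.bit b n' :=
      ⟨n.testBit 0, n >>> 1, (Nat.bit_testBit_zero_shiftRight_one n).symm⟩
    rw [Nat.land_bit, Nat.ldiff_bit, ← ih n']
    have h1 : m &&& n' ≤ m := Nat.and_le_left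
    cases a <;> cases b <;> simp [Nat.bit] <;> omega

-- testBit characterisations of the PySem/core Int bitwise primitives used by the two ports
theorem tb_band (a b : Int) (k : Nat) :
    (PySem.Int.band a b).testBit k = (a.testBit k && b.testBit k) := by
  rcases a with m | m <;> rcases b with n | n
  · have h : PySem.Int.band (Int.ofNat m) (Int.ofNat n) = Int.ofNat (m &&& n) := by
      simp [PySem.Int.band]
    rw [h]; simp [Int.testBit]
  · have h : PySem.Int.band (Int.ofNat m) (Int.negSucc n) = Int.ofNat (m.ldiff n) := by
      simp only [PySem.Int.band, Int.negSucc_eq]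
      norm_num
      rw [if_neg (by omega), sub_and]
    rw [h]; simp [Int.testBit, Nat.testBit_ldiff]
  · have h : PySem.Int.band (Int.negSucc m) (Int.ofNat n) = Int.ofNat (n.ldiff m) := by
      simp only [PySem.Int.band, Int.negSucc_eq]
      norm_num
      rw [sub_and, if_neg (by omega)]
    rw [h]; simp [Int.testBit, Nat.testBit_ldiff, Bool.and_comm]
  · have h : PySem.Int.band (Int.negSucc m) (Int.negSucc n) = Int.negSucc (m ||| n) := by
      simp only [PySem.Int.band, Int.negSucc_eq]
      norm_num
      omega
    rw [h]; simp [Int.testBit]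

theorem tb_bor (a b : Int) (k : Nat) :
    (PySem.Int.bor a b).testBit k = (a.testBit k || b.testBit k) := by
  rcases a with m | m <;> rcases b with n | n
  · have h : PySem.Int.bor (Int.ofNat m) (Int.ofNat n) = Int.ofNat (m ||| n) := by
      simp [PySem.Int.bor]
    rw [h]; simp [Int.testBit]
  · have h : PySem.Int.bor (Int.ofNat m) (Int.negSucc n) = Int.negSucc (n.ldiff m) := by
      simp only [PySem.Int.bor, Int.negSucc_eq]
      norm_num
      rw [if_neg (by omega), ← sub_and]
      omega
    rw [h]; simp [Int.testBit, Nat.testBit_ldiff, Bool.or_comm]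
  · have h : PySem.Int.bor (Int.negSucc m) (Int.ofNat n) = Int.negSucc (m.ldiff n) := by
      simp only [PySem.Int.bor, Int.negSucc_eq]
      norm_num
      rw [if_neg (by omega), ← sub_and]
      omega
    rw [h]; simp [Int.testBit, Nat.testBit_ldiff]
  · have h : PySem.Int.bor (Int.negSucc m) (Int.negSucc n) = Int.negSucc (m &&& n) := by
      simp only [PySem.Int.bor, Int.negSucc_eq]
      norm_num
      omega
    rw [h]; simp [Int.testBit]

theorem tb_not (a : Int) (k : Nat) : (Int.not a).testBit k = !a.testBit k := by
  rcases a with m | m <;> simp [Int.not, Int.testBit]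

theorem tb_two_mul (a : Int) (k : Nat) :
    (2 * a).testBit k = (if k = 0 then false else a.testBit (k - 1)) := by
  rcases a with m | m
  · have h : (2 * (Int.ofNat m)) = Int.ofNat (Nat.bit false m) := by
      rw [Nat.bit_false_apply, Int.ofNat_eq_natCast, Int.ofNat_eq_natCast]; push_cast; ring
    rw [h]
    cases k with
    | zero =>
      simp only [Int.testBit]
      exact Nat.testBit_bit_zero false m
    | succ k =>
      simp only [Int.testBit, Nat.testBit_bit_succ]
      simp
  · have h : (2 * (Int.negSucc m)) = Int.negSucc (Nat.bit true m) := by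
      rw [Nat.bit_true_apply]; simp only [Int.negSucc_eq]; push_cast; ring
    rw [h]
    cases k with
    | zero =>
      simp only [Int.testBit, Nat.testBit_bit_zero]
      rfl
    | succ k =>
      simp only [Int.testBit, Nat.testBit_bit_succ]
      simp

theorem tb_shiftLeft (a : Int) (n k : Nat) :
    (a <<< n).testBit k = (decide (n ≤ k) && a.testBit (k - n)) := by
  induction n generalizing k with
  | zero => simp [Int.shiftLeft_eq]
  | succ n ih =>
    have h : a <<< (n + 1) = 2 * (a <<< n) := by
      rw [Int.shiftLeft_eq, Int.shiftLeft_eq, pow_succ]; ring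
    rw [h, tb_two_mul]
    by_cases hk : k = 0
    · simp [hk]
    · rw [if_neg hk, ih]
      rcases Nat.lt_or_ge k (n + 1) with h | h
      · simp [Nat.not_le_of_lt h, show ¬ n ≤ k - 1 by omega]
      · simp [h, show n ≤ k - 1 by omega, show k - 1 - n = k - (n+1) by omega]

theorem tb_shiftRight (a : Int) (n k : Nat) :
    (a >>> n).testBit k = a.testBit (k + n) := by
  rcases a with m | m
  · have h : Int.ofNat m >>> n = Int.ofNat (m >>> n) := rfl
    rw [h]
    simp [Int.testBit, Nat.testBit_shiftRight, Nat.add_comm n k]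
  · have h : Int.negSucc m >>> n = Int.negSucc (m >>> n) := rfl
    rw [h]
    simp [Int.testBit, Nat.testBit_shiftRight, Nat.add_comm n k]

-- two integers with the same two’s-complement bits are equal
theorem tb_ext (a b : Int) (h : ∀ k, a.testBit k = b.testBit k) : a = b := by
  rcases a with m | m <;> rcases b with n | n
  · exact congrArg Int.ofNat (Nat.eq_of_testBit_eq fun k => h k)
  · exfalso
    have hK := h (m + n)
    have hm : m < 2 ^ (m + n) :=
      Nat.lt_of_lt_of_le Nat.lt_two_pow_self (Nat.pow_le_pow_right (by norm_num) (by omega))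
    have hn : n < 2 ^ (m + n) :=
      Nat.lt_of_lt_of_le Nat.lt_two_pow_self (Nat.pow_le_pow_right (by norm_num) (by omega))
    simp [Int.testBit, Nat.testBit_eq_false_of_lt hm, Nat.testBit_eq_false_of_lt hn] at hK
  · exfalso
    have hK := h (m + n)
    have hm : m < 2 ^ (m + n) :=
      Nat.lt_of_lt_of_le Nat.lt_two_pow_self (Nat.pow_le_pow_right (by norm_num) (by omega))
    have hn : n < 2 ^ (m + n) :=
      Nat.lt_of_lt_of_le Nat.lt_two_pow_self (Nat.pow_le_pow_right (by norm_num) (by omega))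
    simp [Int.testBit, Nat.testBit_eq_false_of_lt hm, Nat.testBit_eq_false_of_lt hn] at hK
  · have h2 : m = n := Nat.eq_of_testBit_eq fun k => by
      have hx := h k; simpa [Int.testBit] using hx
    exact congrArg Int.negSucc h2

-- testBit of the low-w-bits mask (1 <<< w) - 1
theorem tb_mask (w k : Nat) : (((1:Int) <<< w) - 1).testBit k = decide (k < w) := by
  have h : ((1:Int) <<< w) - 1 = Int.ofNat (2 ^ w - 1) := by
    rw [Int.shiftLeft_eq, Int.ofNat_eq_natCast]
    have h1 : (1:Nat) ≤ 2 ^ w := Nat.one_le_two_pow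
    push_cast [h1]
    ring
  rw [h]
  simp [Int.testBit, Nat.testBit_two_pow_sub_one]

theorem tb_one (n k : Nat) : ((1:Int) <<< n).testBit k = decide (k = n) := by
  rw [tb_shiftLeft]
  rcases Nat.lt_or_ge k n with h | h
  · simp [Nat.not_le_of_lt h]; omega
  · rcases Nat.eq_or_lt_of_le h with rfl | h'
    · simp
      decide
    · have hz : (1:Int).testBit (k - n) = false := by
        have : (1:Int) = Int.ofNat 1 := rfl
        rw [this]
        simp only [Int.testBit]
        apply Nat.testBit_eq_false_of_lt
        have : 1 ≤ k - n := by omega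
        calc 1 < 2^1 := by norm_num
        _ ≤ 2 ^ (k-n) := Nat.pow_le_pow_right (by norm_num) this
      simp [hz]; omega

-- the central bit identity: one more clear-and-OR step of A absorbed into the masked closed form
theorem key_step (N M : Int) (i c : Nat) :
    PySem.Int.bor
      (PySem.Int.band
        (PySem.Int.bor (PySem.Int.band N (Int.not ((1:Int) <<< (i + (c + 1))))) ((M >>> (c + 1)) <<< (i + (c + 1))))
        (Int.not ((((1:Int) <<< (c + 1)) - 1) <<< i)))
      (M <<< i)
    = PySem.Int.bor (PySem.Int.band N (Int.not ((((1:Int) <<< (c + 1 + 1)) - 1) <<< i))) (M <<< i) := by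
  apply tb_ext
  intro t
  have hmask : ∀ w : Nat, ((((1:Int) <<< w) - 1) <<< i).testBit t = (decide (i ≤ t) && decide (t - i < w)) := by
    intro w
    rw [tb_shiftLeft, tb_mask]
  have hM1 : ((M >>> (c + 1)) <<< (i + (c + 1))).testBit t
      = (decide (i + (c + 1) ≤ t) && M.testBit (t - (i + (c + 1)) + (c + 1))) := by
    rw [tb_shiftLeft, tb_shiftRight]
  have hM0 : (M <<< i).testBit t = (decide (i ≤ t) && M.testBit (t - i)) := by
    rw [tb_shiftLeft]
  simp only [tb_bor, tb_band, tb_not, tb_one, hmask, hM1, hM0]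
  rcases Nat.lt_or_ge t i with h1 | h1
  · simp [Nat.not_le_of_lt h1, show ¬ i + (c+1) ≤ t by omega]
    intro _
    omega
  · rcases Nat.lt_or_ge t (i + (c + 1)) with h2 | h2
    · simp [h1, show ¬ i + (c + 1) ≤ t by omega, show t ≠ i + (c + 1) by omega,
            show t - i < c + 1 by omega, show t - i < c + 1 + 1 by omega]
    · rcases Nat.eq_or_lt_of_le h2 with h3 | h3
      · have e1 : t - (i + (c + 1)) + (c + 1) = t - i := by omega
        simp [← h3]
      · have e1 : t - (i + (c + 1)) + (c + 1) = t - i := by omega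
        simp [h1, h2, e1, show t ≠ i + (c + 1) by omega,
              show ¬ t - i < c + 1 by omega, show ¬ t - i < c + 1 + 1 by omega]

-- range(c, -1, -1) is [c, c-1, …, 0]
theorem pyRange_down (cn : Nat) :
    PySem.List.pyRange (cn : Int) (-1) (-1) =
      (List.range (cn + 1)).map (fun k : Nat => (cn : Int) - (k : Int)) := by
  simp only [PySem.List.pyRange]
  norm_num
  rw [if_pos (by omega : (-1:Int) < (cn:Int))]
  apply List.map_congr_left
  intro k _
  ring

-- loop invariant: A's whole loop for k = c..0 equals B's masked closed form
theorem loop_eq (M : Int) (i : Nat) (c : Nat) : ∀ N : Int,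
    ((List.range (c + 1)).map (fun k : Nat => (c : Int) - (k : Int))).foldl
      (fun N k => PySem.Int.bor (PySem.Int.band N (Int.not ((1:Int) <<< (i + k.toNat))))
                  ((M >>> (k.toNat : Nat)) <<< (i + k.toNat))) N
    = PySem.Int.bor (PySem.Int.band N (Int.not ((((1:Int) <<< (c + 1)) - 1) <<< i))) (M <<< i) := by
  induction c with
  | zero =>
    intro N
    simp [List.range_succ]
    have hm : (((1:Int) <<< (1:Nat)) - 1) <<< i = (1:Int) <<< i := by
      apply tb_ext
      intro t
      rw [tb_shiftLeft, tb_mask, tb_one, ← Bool.decide_and, decide_eq_decide]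
      omega
    rw [hm]
  | succ c ih =>
    intro N
    rw [List.range_succ_eq_map]
    simp only [List.map_cons, List.map_map, List.foldl_cons]
    have hmap : (List.range (c + 1)).map ((fun k : Nat => (((c:Nat) + 1 : Nat) : Int) - (k : Int)) ∘ Nat.succ) =
        (List.range (c + 1)).map (fun k : Nat => (c : Int) - (k : Int)) := by
      apply List.map_congr_left
      intro k _
      simp only [Function.comp]
      push_cast
      ring
    rw [hmap, ih]
    have h0 : ((((c:Nat) + 1 : Nat) : Int) - ((0:Nat) : Int)).toNat = c + 1 := by omega
    rw [h0]
    exact key_step N M i c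

-- ===== VERDICT (by name: the statement is the Claim_ definition above) =====
theorem insert_bits2_spec : Claim_equal_insert_bits2 := by
  intro N M i j _ hpre
  unfold Spec_insert_bits2
  unfold Pre_insert_bits2 at hpre
  unfold insert_bits2 insert_bits2_alt
  dsimp only
  rcases lt_or_ge j i with hji | hji
  · rw [if_pos hji]
    have hempty : PySem.List.pyRange (j - i) (-1) (-1) = [] := by
      simp only [PySem.List.pyRange]
      norm_num
      intro h
      omega
    rw [hempty]
    rfl
  · have hi : 0 ≤ i := by rcases hpre with h | h; omega; exact h
    rw [if_neg (not_lt.mpr hji)]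
    set cn := (j - i).toNat with hcn
    have hcount : j - i = (cn : Int) := by omega
    rw [hcount]
    rw [pyRange_down cn]
    have h2 : ((List.range (cn + 1)).map (fun k : Nat => (cn : Int) - (k : Int))).foldl
        (fun N k => PySem.Int.bor
          (PySem.Int.band N (Int.not ((1:Int) <<< (j - ((cn : Int) - k)).toNat)))
          ((M >>> k.toNat) <<< (j - ((cn : Int) - k)).toNat)) N
      = ((List.range (cn + 1)).map (fun k : Nat => (cn : Int) - (k : Int))).foldl
        (fun N k => PySem.Int.bor (PySem.Int.band N (Int.not ((1:Int) <<< (i.toNat + k.toNat))))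
          ((M >>> (k.toNat : Nat)) <<< (i.toNat + k.toNat))) N := by
      apply PySem.List.foldl_congr_mem
      intro N' k hk
      have hk' : 0 ≤ k ∧ k ≤ (cn:Int) := by
        simp at hk
        obtain ⟨u, hu, rfl⟩ := hk
        omega
      rw [show (j - ((cn:Int) - k)).toNat = i.toNat + k.toNat from by omega]
    rw [h2, loop_eq M i.toNat cn N]
    rw [show ((cn:Int) + 1).toNat = cn + 1 from by omega]
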